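-- pv_equiv track=rewrite | github.com/ScorchingShade/Encryptor | venv/lib/python3.6/site-packages/passwordstrength/passwordmeter.py | _count_conseq
-- ===== SOURCE A (Python) =====
-- def _count_conseq(password, rule_string):
--     temp_char = ''
--     n = 0
--     for char in password:
--         if char in rule_string:
--             if temp_char:
--                 if temp_char in rule_string:
--                     n += 1
--             temp_char = char
--     return n
-- ===== SOURCE B (Python) =====
-- def _count_conseq(password, rule_string):
--     total = sum(1 for c in password if c in rule_string)
--     return total - 1 if total else 0
-- ===== Notes on version B (the rewrite author's own statement) =====
-- stated objective: simpler
-- what changed: Replaces the stateful loop tracking the previous matching char (temp_char) and its nested conditionals with a closed count-then-adjust form: count the password chars in rule_string and return count-1 clamped at zero, since temp_char is only ever a char already known to be in rule_string.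
import Mathlib
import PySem

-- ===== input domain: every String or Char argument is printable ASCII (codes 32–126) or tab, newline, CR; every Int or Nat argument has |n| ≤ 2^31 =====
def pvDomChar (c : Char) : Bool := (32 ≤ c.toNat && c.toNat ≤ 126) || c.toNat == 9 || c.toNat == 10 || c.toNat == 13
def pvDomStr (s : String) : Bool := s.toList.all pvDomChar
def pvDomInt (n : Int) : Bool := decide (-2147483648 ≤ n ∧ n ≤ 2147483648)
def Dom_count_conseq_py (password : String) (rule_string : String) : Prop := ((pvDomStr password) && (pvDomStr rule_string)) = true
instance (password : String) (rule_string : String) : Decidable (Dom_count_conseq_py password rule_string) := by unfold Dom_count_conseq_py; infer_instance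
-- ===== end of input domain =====

-- B replaces A's stateful previous-char loop by a closed count-then-adjust form (objective: simpler).

-- ===== PORT A =====
-- A's loop state: (temp_char, n); temp_char = '' is modelled as `none`.
def count_conseq_py (password : String) (rule_string : String) : Int :=
  (password.toList.foldl
    (fun (st : Option Char × Int) char =>
      if rule_string.toList.contains char then
        (some char,
         match st.1 with
         | some t => if rule_string.toList.contains t then st.2 + 1 else st.2
         | none => st.2)
      else st)
    (none, 0)).2

-- ===== PORT B =====
def count_conseq_py_alt (password : String) (rule_string : String) : Int :=
  let total : Int := (password.toList.countP (fun c => rule_string.toList.contains c) : Nat)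
  if total ≠ 0 then total - 1 else 0

-- ===== PRECONDITION & SPEC =====
def Spec_count_conseq_py (password : String) (rule_string : String) (out : Int) : Prop := out = count_conseq_py_alt password rule_string
instance (password : String) (rule_string : String) (out : Int) : Decidable (Spec_count_conseq_py password rule_string out) := by unfold Spec_count_conseq_py; infer_instance

-- ===== CLAIM (what is proved, stated in full; the proofs are below) =====
def Claim_equal_count_conseq_py : Prop := ∀ (password : String) (rule_string : String), Dom_count_conseq_py password rule_string → Spec_count_conseq_py password rule_string (count_conseq_py password rule_string)

-- ===== LEMMAS AND PROOFS =====

-- once temp_char holds a char in rule_string, each further match adds 1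
theorem pv_fold_some (rs : List Char) (l : List Char) (t : Char) (ht : rs.contains t = true)
    (n : Int) :
    (l.foldl
      (fun (st : Option Char × Int) char =>
        if rs.contains char then
          (some char,
           match st.1 with
           | some t => if rs.contains t then st.2 + 1 else st.2
           | none => st.2)
        else st)
      (some t, n)).2 = n + (l.countP (fun c => rs.contains c) : Int) := by
  induction l generalizing t n with
  | nil => simp
  | cons c l ih =>
    rw [List.foldl_cons]
    by_cases hc : rs.contains c = true
    · simp only [hc, ht, if_true]
      rw [ih c hc, List.countP_cons_of_pos (pa := hc)]
      have he : List.countP (fun c => rs.contains c) l = List.countP rs.contains l := rfl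
      rw [he]; push_cast; omega
    · rw [if_neg hc, ih t ht,
        List.countP_cons_of_neg (pa := by simpa using hc)]

theorem pv_fold_none (rs : List Char) (l : List Char) :
    (l.foldl
      (fun (st : Option Char × Int) char =>
        if rs.contains char then
          (some char,
           match st.1 with
           | some t => if rs.contains t then st.2 + 1 else st.2
           | none => st.2)
        else st)
      (none, 0)).2 =
    (if (l.countP (fun c => rs.contains c) : Int) ≠ 0
     then (l.countP (fun c => rs.contains c) : Int) - 1 else 0) := by
  induction l with
  | nil => simp
  | cons c l ih =>
    rw [List.foldl_cons]
    by_cases hc : rs.contains c = true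
    · simp only [hc, if_true]
      rw [pv_fold_some rs l c hc 0, List.countP_cons_of_pos (pa := hc)]
      have he : List.countP (fun c => rs.contains c) l = List.countP rs.contains l := rfl
      rw [he]; push_cast; omega
    · rw [if_neg hc, ih,
        List.countP_cons_of_neg (pa := by simpa using hc)]

-- ===== VERDICT (by name: the statement is the Claim_ definition above) =====
theorem count_conseq_py_spec : Claim_equal_count_conseq_py := by
  intro password rule_string _
  unfold Spec_count_conseq_py count_conseq_py count_conseq_py_alt
  exact pv_fold_none rule_string.toList password.toList
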